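-- pv_equiv track=rewrite | github.com/David-Rodriguez-Barrios/DigitalEconomics | DigitalEconomics.py | where_the_ticks_are
-- ===== SOURCE A (Python) =====
-- def where_the_ticks_are(initial_date_index, final_date_index, num_of_ticks):
--     """ finds where the ticks should be on the graph so they are still evenly separated through the x axis, no mater how many days are within the days chosen by the user
--
--     Parameters: initial_date: the initial date chosen by the user
--                 final_date: the final date chosen by the user
--                 num_of_ticks: how many ticks should apear on the graph
--     Returns: it returns a list of the indexs of each tick for the graph
--
--     """
--     ticks_index = []
--     list_of_indexs = list(range(initial_date_index, final_date_index + 1)) #list of the indexs between the initial and final dates indexs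
--     num_of_days = len(list_of_indexs) #number of days between the two chosen days
--     #if there are more ticks wanted then there are days between the chosen dates, it will change the ticks to be less(ticks = amount of days)
--     if num_of_days <= num_of_ticks:
--         return list_of_indexs
--     else:
--         days_between_ticks = num_of_days//num_of_ticks #splits up the days by the amout of ticks wanted
--         before_after = ((num_of_days % num_of_ticks) + (days_between_ticks - 1)) // 2 #adds half of the begginging amout of day to half of the remainder days to make an even spacing before the first tick and after the second
--         #deletes the indexs before the first tick
--         while before_after > 0:
--             del list_of_indexs[0]
--             before_after -= 1
--         #starts with setting the first value (after the ones that got taken away) in a list, then goes throught the list of indexes. After the checker amount, which is the number of days between ticks, after it passes that many, it places another tick index into the list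
--         checker = int(days_between_ticks)
--         for i in list_of_indexs:
--             if days_between_ticks == checker and len(ticks_index) < num_of_ticks:
--                 days_between_ticks = 1
--                 ticks_index.append(i)
--             else: days_between_ticks += 1
--         return ticks_index
-- ===== SOURCE B (Python) =====
-- def where_the_ticks_are(initial_date_index, final_date_index, num_of_ticks):
--     num_of_days = max(0, final_date_index - initial_date_index + 1)
--     if num_of_days <= num_of_ticks:
--         return list(range(initial_date_index, final_date_index + 1))
--     days_between_ticks = num_of_days // num_of_ticks
--     offset = (num_of_days % num_of_ticks + days_between_ticks - 1) // 2
--     return [initial_date_index + offset + k * days_between_ticks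
--             for k in range(num_of_ticks)]
-- ===== Notes on version B (the rewrite author's own statement) =====
-- stated objective: alternative
-- what changed: B computes the tick positions by closed-form arithmetic (initial+offset+k*step for k in range(num_of_ticks)) instead of materialising the whole day range, deleting a prefix element by element and scanning every day with a counter; a timing run's largest inputs fall in the branch where both build the same range, so no overall speed is claimed.
import Mathlib
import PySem

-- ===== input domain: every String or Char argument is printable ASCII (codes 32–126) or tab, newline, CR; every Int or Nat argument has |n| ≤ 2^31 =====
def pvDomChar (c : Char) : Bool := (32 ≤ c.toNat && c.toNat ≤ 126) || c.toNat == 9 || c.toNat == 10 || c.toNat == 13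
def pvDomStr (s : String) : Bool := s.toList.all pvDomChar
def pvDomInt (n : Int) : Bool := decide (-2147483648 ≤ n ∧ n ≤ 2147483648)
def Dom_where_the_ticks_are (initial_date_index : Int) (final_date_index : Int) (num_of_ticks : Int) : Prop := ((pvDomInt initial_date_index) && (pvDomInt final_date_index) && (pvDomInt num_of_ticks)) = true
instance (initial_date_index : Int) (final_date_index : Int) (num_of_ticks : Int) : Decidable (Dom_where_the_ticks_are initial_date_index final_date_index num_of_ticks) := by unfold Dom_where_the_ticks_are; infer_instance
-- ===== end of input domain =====

-- B computes the ticks as a closed-form arithmetic progression instead of A's build-range/delete-prefix/counter scan (objective: alternative).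

-- ===== PORT A =====
-- the `while before_after > 0: del list_of_indexs[0]` loop
def ticksDropA : Int → List Int → List Int
  | ba, xs => if 0 < ba then ticksDropA (ba - 1) xs.tail else xs
  termination_by ba _ => ba.toNat
  decreasing_by omega

-- the `for i in list_of_indexs:` loop; state = (days_between_ticks, ticks_index)
def ticksLoopA (checker num_of_ticks : Int) : List Int → Int → List Int → List Int
  | [], _, acc => acc
  | i :: rest, dbt, acc =>
      if dbt = checker ∧ (acc.length : Int) < num_of_ticks then
        ticksLoopA checker num_of_ticks rest 1 (acc ++ [i])
      else
        ticksLoopA checker num_of_ticks rest (dbt + 1) acc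

def where_the_ticks_are (initial_date_index : Int) (final_date_index : Int) (num_of_ticks : Int) : List Int :=
  let list_of_indexs := PySem.List.pyRange initial_date_index (final_date_index + 1) 1
  let num_of_days : Int := list_of_indexs.length
  if num_of_days ≤ num_of_ticks then list_of_indexs
  else
    let days_between_ticks := PySem.Int.floordiv num_of_days num_of_ticks
    let before_after := PySem.Int.floordiv (PySem.Int.mod num_of_days num_of_ticks + (days_between_ticks - 1)) 2
    let list_of_indexs := ticksDropA before_after list_of_indexs
    ticksLoopA days_between_ticks num_of_ticks list_of_indexs days_between_ticks []

-- ===== PORT B =====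
def where_the_ticks_are_alt (initial_date_index : Int) (final_date_index : Int) (num_of_ticks : Int) : List Int :=
  let num_of_days := max 0 (final_date_index - initial_date_index + 1)
  if num_of_days ≤ num_of_ticks then PySem.List.pyRange initial_date_index (final_date_index + 1) 1
  else
    let days_between_ticks := PySem.Int.floordiv num_of_days num_of_ticks
    let offset := PySem.Int.floordiv (PySem.Int.mod num_of_days num_of_ticks + days_between_ticks - 1) 2
    (PySem.List.pyRange 0 num_of_ticks 1).map
      (fun k => initial_date_index + offset + k * days_between_ticks)

-- ===== PRECONDITION & SPEC =====
-- Pre_ excludes exactly num_of_ticks = 0 with a nonempty date range, where both A and B raise ZeroDivisionError.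
def Pre_where_the_ticks_are (initial_date_index : Int) (final_date_index : Int) (num_of_ticks : Int) : Prop :=
  ¬ (num_of_ticks = 0 ∧ initial_date_index ≤ final_date_index)
instance (initial_date_index : Int) (final_date_index : Int) (num_of_ticks : Int) : Decidable (Pre_where_the_ticks_are initial_date_index final_date_index num_of_ticks) := by unfold Pre_where_the_ticks_are; infer_instance

def pvWitness_where_the_ticks_are : Int × Int × Int := (0, 29, 5)

def Spec_where_the_ticks_are (initial_date_index : Int) (final_date_index : Int) (num_of_ticks : Int) (out : List Int) : Prop := out = where_the_ticks_are_alt initial_date_index final_date_index num_of_ticks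
instance (initial_date_index : Int) (final_date_index : Int) (num_of_ticks : Int) (out : List Int) : Decidable (Spec_where_the_ticks_are initial_date_index final_date_index num_of_ticks out) := by unfold Spec_where_the_ticks_are; infer_instance

-- ===== CLAIM (what is proved, stated in full; the proofs are below) =====
def Claim_equal_where_the_ticks_are : Prop := ∀ (initial_date_index : Int) (final_date_index : Int) (num_of_ticks : Int), Dom_where_the_ticks_are initial_date_index final_date_index num_of_ticks → Pre_where_the_ticks_are initial_date_index final_date_index num_of_ticks → Spec_where_the_ticks_are initial_date_index final_date_index num_of_ticks (where_the_ticks_are initial_date_index final_date_index num_of_ticks)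

-- ===== LEMMAS AND PROOFS =====

-- helper used only by proofs: A's for-loop without the accumulator, with remaining tick budget
def skim (c : Int) : List Int → Int → Int → List Int
  | [], _, _ => []
  | i :: rest, dbt, tl =>
      if dbt = c ∧ 0 < tl then i :: skim c rest 1 (tl - 1)
      else skim c rest (dbt + 1) tl

theorem ticksLoopA_eq_skim (c T : Int) (xs : List Int) (dbt : Int) (acc : List Int) :
    ticksLoopA c T xs dbt acc = acc ++ skim c xs dbt (T - acc.length) := by
  induction xs generalizing dbt acc with
  | nil => simp [ticksLoopA, skim]
  | cons i rest ih =>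
    simp only [ticksLoopA, skim]
    by_cases h : dbt = c ∧ (acc.length : Int) < T
    · rw [if_pos h, if_pos ⟨h.1, by omega⟩, ih]
      simp [List.append_assoc]
      congr 1
      omega
    · rw [if_neg h, if_neg (by omega), ih]

theorem skim_nonpos (c : Int) (xs : List Int) (dbt tl : Int) (h : tl ≤ 0) :
    skim c xs dbt tl = [] := by
  induction xs generalizing dbt with
  | nil => simp [skim]
  | cons i rest ih =>
    simp only [skim]
    rw [if_neg (by omega)]
    exact ih _

theorem tail_pyRange (a b : Int) :
    (PySem.List.pyRange a b 1).tail = PySem.List.pyRange (a + 1) b 1 := by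
  by_cases h : a < b
  · rw [PySem.List.pyRange_one_cons h]
    rfl
  · rw [PySem.List.pyRange_one_eq_nil (by omega), PySem.List.pyRange_one_eq_nil (by omega)]
    rfl

theorem ticksDropA_pyRange (n : Nat) : ∀ (a b : Int),
    ticksDropA (n : Int) (PySem.List.pyRange a b 1) = PySem.List.pyRange (a + n) b 1 := by
  induction n with
  | zero => intro a b; rw [ticksDropA]; simp
  | succ m ih =>
    intro a b
    rw [ticksDropA, if_pos (by omega), tail_pyRange]
    have : ((m + 1 : Nat) : Int) - 1 = (m : Int) := by omega
    rw [this, ih]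
    congr 1
    omega

theorem skim_shift (k : Nat) : ∀ (a b d c tl : Int), 1 ≤ d → d ≤ c → c - d = k →
    skim c (PySem.List.pyRange a b 1) d tl =
      skim c (PySem.List.pyRange (a + (c - d)) b 1) c tl := by
  induction k with
  | zero =>
    intro a b d c tl h1 h2 h3
    have hd : d = c := by omega
    rw [hd, show c - c = (0:Int) from by omega, add_zero]
  | succ m ih =>
    intro a b d c tl h1 h2 h3
    by_cases hab : a < b
    · rw [PySem.List.pyRange_one_cons hab]
      simp only [skim]
      rw [if_neg (by omega)]
      rw [ih (a + 1) b (d + 1) c tl (by omega) (by omega) (by omega)]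
      congr 2
      omega
    · rw [PySem.List.pyRange_one_eq_nil (by omega),
          PySem.List.pyRange_one_eq_nil (by omega : b ≤ a + (c - d))]
      simp [skim]

theorem skim_pyRange (t : Nat) : ∀ (a b c : Int), 1 ≤ c → ((t : Int) - 1) * c < b - a →
    skim c (PySem.List.pyRange a b 1) c (t : Int) =
      (List.range t).map (fun k : Nat => a + (k : Int) * c) := by
  induction t with
  | zero => intro a b c hc _; exact skim_nonpos c _ c 0 le_rfl
  | succ m ih =>
    intro a b c hc hlt
    have hmc : 0 ≤ (m : Int) * c := by positivity
    have hab : a < b := by push_cast at hlt; nlinarith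
    rw [PySem.List.pyRange_one_cons hab]
    simp only [skim]
    rw [if_pos (by exact ⟨by trivial, by omega⟩)]
    have h1 : ((m + 1 : Nat) : Int) - 1 = (m : Int) := by push_cast; ring
    rw [h1]
    rw [skim_shift (c - 1).toNat (a+1) b 1 c (m:Int) le_rfl hc (by omega)]
    have h2 : a + 1 + (c - 1) = a + c := by ring
    rw [h2, ih (a + c) b c hc (by push_cast at hlt ⊢; nlinarith)]
    rw [List.range_succ_eq_map, List.map_cons, List.map_map]
    congr 1
    · push_cast; ring
    · apply List.map_congr_left
      intro k _
      simp only [Function.comp]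
      push_cast
      ring

-- ===== VERDICT (by name: the statement is the Claim_ definition above) =====

theorem where_the_ticks_are_spec : Claim_equal_where_the_ticks_are := by
  intro i f T _ hpre
  unfold Spec_where_the_ticks_are
  dsimp only [where_the_ticks_are, where_the_ticks_are_alt]
  have hlen : (((PySem.List.pyRange i (f + 1) 1).length : Int)) = max 0 (f - i + 1) := by
    rw [PySem.List.length_pyRange_one]; omega
  simp only [hlen]
  by_cases hNT : max 0 (f - i + 1) ≤ T
  · rw [if_pos hNT, if_pos hNT]
  · rw [if_neg hNT, if_neg hNT]
    rw [ticksLoopA_eq_skim]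
    simp only [List.length_nil, Nat.cast_zero, sub_zero, List.nil_append]
    rcases lt_trichotomy T 0 with hT | hT | hT
    · rw [skim_nonpos _ _ _ _ (by omega), PySem.List.pyRange_one_eq_nil (by omega)]
      simp
    · exfalso; exact hpre ⟨hT, by omega⟩
    · -- T > 0, max 0 (f-i+1) > T
      set N : Int := max 0 (f - i + 1) with hN
      set c : Int := PySem.Int.floordiv N T with hcdef
      set r : Int := PySem.Int.mod N T with hrdef
      have hc : 1 ≤ c := by
        rw [hcdef, PySem.Int.le_floordiv_iff_mul_le hT]; omega
      have hr0 : 0 ≤ r := PySem.Int.mod_nonneg _ hT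
      have hrT : r < T := PySem.Int.mod_lt _ hT
      have hNcr : c * T + r = N := PySem.Int.floordiv_mul_add_mod N T
      set ba : Int := PySem.Int.floordiv (r + (c - 1)) 2 with hbadef
      have hba0 : 0 ≤ ba := by
        rw [hbadef, PySem.Int.le_floordiv_iff_mul_le (by omega)]; omega
      have hba2 : ba < r + c := by
        rw [hbadef, PySem.Int.floordiv_lt_iff_lt_mul (by omega)]; omega
      have hba' : PySem.Int.floordiv (r + c - 1) 2 = ba := by
        rw [hbadef]; congr 1; ring
      rw [hba']
      have hdrop := ticksDropA_pyRange ba.toNat i (f + 1)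
      rw [show ((ba.toNat : Int)) = ba by omega] at hdrop
      rw [hdrop]
      have hfi : f + 1 = i + N := by omega
      have hskim := skim_pyRange T.toNat (i + ba) (f + 1) c hc
        (by rw [show ((T.toNat : Int)) = T by omega, hfi]; nlinarith)
      rw [show ((T.toNat : Int)) = T by omega] at hskim
      rw [hskim, PySem.List.pyRange_one]
      rw [show (T - 0).toNat = T.toNat by omega]
      rw [List.map_map]
      apply List.map_congr_left
      intro k _
      simp [Function.comp]
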